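-- pv_equiv track=rewrite | github.com/hann2a/Algorithm | Programmers/67259/sol.py | solution
-- ===== SOURCE A (Python) =====
-- import heapq
--
-- def solution(board):
--     n = len(board)
--     INF = 10**9
--
--     # 상, 하, 좌, 우
--     delta = [(-1, 0), (1, 0), (0, -1), (0, 1)]
--
--     # 3차원 비용 배열 [r][c][delta]
--     cost = [[[INF]*4 for _ in range(n)] for _ in range(n)]
--
--     # 우선순위 큐(최소 힙) 컨테이너
--     pq = []
--
--     for d in range(4):
--         cost[0][0][d] = 0
--         heapq.heappush(pq, (0, 0, 0, d)) # (비용, r, c, 방향)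
--
--     while pq:
--         # 최소 비용 pop
--         here_cost, r, c, d = heapq.heappop(pq)
--
--         # 같은 상태에 대해 더 싼 비용으로 방문 기록이 있으면 가지치기
--         if here_cost > cost[r][c][d]:
--             continue
--
--         # 다익스트라 특성상 처음 도착했을 때의 비용이 곧 최솟값이므로 즉시 반환
--         if (r, c) == (n-1, n-1):
--             return here_cost
--
--         # 4방향으로 인접 칸 시도. next_d는 다음 방향 인덱스
--         for next_d, (dr, dc) in enumerate(delta):
--             nr, nc = r + dr, c + dc
--
--             # 보드 밖이면 pass
--             if not (0 <= nr < n and 0 <= nc < n):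
--                 continue
--
--             # 벽이면 pass
--             if board[nr][nc] == 1:
--                 continue
--
--             # 같은 방향 유지면 100, 방향 바뀌면 600
--             # 새로운 누적 비용 nc 계산
--             add = 100 if d == next_d else 600
--             new_cost = here_cost + add
--
--             # 지금 비용이 더 싸면 push
--             if cost[nr][nc][next_d] > new_cost:
--                 cost[nr][nc][next_d] = new_cost
--                 heapq.heappush(pq, (new_cost, nr, nc, next_d))
--     return min(cost[n-1][n-1])
-- ===== SOURCE B (Python) =====
-- def solution(board):
--     n = len(board)
--     INF = 10**9
--     delta = [(-1, 0), (1, 0), (0, -1), (0, 1)]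
--     cost = [[[INF] * 4 for _ in range(n)] for _ in range(n)]
--     for d in range(4):
--         cost[0][0][d] = 0
--     changed = True
--     while changed:
--         changed = False
--         for r in range(n):
--             for c in range(n):
--                 for d in range(4):
--                     base = cost[r][c][d]
--                     for nd, (dr, dc) in enumerate(delta):
--                         nr, nc = r + dr, c + dc
--                         if not (0 <= nr < n and 0 <= nc < n):
--                             continue
--                         if board[nr][nc] == 1:
--                             continue
--                         w = 100 if d == nd else 600
--                         if base + w < cost[nr][nc][nd]:
--                             cost[nr][nc][nd] = base + w
--                             changed = True
--     return min(cost[n - 1][n - 1])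
-- ===== Notes on version B (the rewrite author's own statement) =====
-- stated objective: alternative
-- what changed: Replaces heap-based Dijkstra with an early return at the goal by a queue-free Bellman-Ford relaxation: full sweeps over all (r,c,direction) states, relaxing the four outgoing moves in place, repeated until a sweep changes nothing, then min over the goal cell's four direction labels.
-- outside the precondition, e.g. on solution([[1, 1], [1]]): A returns 1000000000, B raises IndexError
import Mathlib
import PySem

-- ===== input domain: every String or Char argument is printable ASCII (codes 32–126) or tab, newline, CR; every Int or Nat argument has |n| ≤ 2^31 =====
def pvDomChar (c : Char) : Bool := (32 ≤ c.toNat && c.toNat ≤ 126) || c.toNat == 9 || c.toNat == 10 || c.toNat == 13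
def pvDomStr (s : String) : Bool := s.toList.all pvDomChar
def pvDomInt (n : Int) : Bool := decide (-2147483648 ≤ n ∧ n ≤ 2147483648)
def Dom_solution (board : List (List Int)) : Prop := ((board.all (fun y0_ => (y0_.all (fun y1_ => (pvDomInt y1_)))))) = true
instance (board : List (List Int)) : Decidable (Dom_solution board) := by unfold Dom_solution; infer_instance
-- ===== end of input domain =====

-- B replaces heap Dijkstra (with its early return at the goal) by queue-free Bellman-Ford
-- sweeps repeated until stable; objective: alternative algorithm (not faster).
-- Both ports model the Python 3-d cost list as a function (Int → Int → Int → Int) holding the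
-- same values at the same indices, and the heap of A as the multiset of its entries, popping
-- the lexicographically least tuple — exactly what heapq.heappop returns.

-- ===== PORT A =====

-- board[r][c] == 1 (only evaluated at in-range indices under Pre_solution)
def pvAwall (board : List (List Int)) (r c : Int) : Bool :=
  PySem.List.pyGetD (PySem.List.pyGetD board r []) c 0 == 1

def pvAdelta : List (Int × Int) := [(-1, 0), (1, 0), (0, -1), (0, 1)]

def pvAset (f : Int → Int → Int → Int) (r c d v : Int) : Int → Int → Int → Int :=
  fun r' c' d' => if r' = r ∧ c' = c ∧ d' = d then v else f r' c' d'

-- lexicographic min of two heap entries (heapq orders tuples lexicographically)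
def pvAminE (a b : Int × Int × Int × Int) : Int × Int × Int × Int :=
  if a.1 < b.1 ∨ (a.1 = b.1 ∧ (a.2.1 < b.2.1 ∨ (a.2.1 = b.2.1 ∧
      (a.2.2.1 < b.2.2.1 ∨ (a.2.2.1 = b.2.2.1 ∧ a.2.2.2 < b.2.2.2))))) then a else b

-- min(cost[n-1][n-1]) over the four direction entries
def pvAgoalMin (cost : Int → Int → Int → Int) (n : Int) : Int :=
  min (min (min (cost (n-1) (n-1) 0) (cost (n-1) (n-1) 1)) (cost (n-1) (n-1) 2)) (cost (n-1) (n-1) 3)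

-- body of 'for next_d, (dr, dc) in enumerate(delta)'
def pvAstep (board : List (List Int)) (n hc r c d : Int)
    (st : List (Int × Int × Int × Int) × (Int → Int → Int → Int)) (p : Int × Int × Int) :
    List (Int × Int × Int × Int) × (Int → Int → Int → Int) :=
  let nd := p.1
  let nr := r + p.2.1
  let nc := c + p.2.2
  if 0 ≤ nr ∧ nr < n ∧ 0 ≤ nc ∧ nc < n then
    if pvAwall board nr nc then st
    else
      let add : Int := if d = nd then 100 else 600
      let newc := hc + add
      if newc < st.2 nr nc nd then ((newc, nr, nc, nd) :: st.1, pvAset st.2 nr nc nd newc)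
      else st
  else st

-- the 'while pq:' loop; fuel is a proved upper bound on the number of iterations
def pvAloop (board : List (List Int)) (n : Int) :
    Nat → List (Int × Int × Int × Int) → (Int → Int → Int → Int) → Int
  | 0, _, cost => pvAgoalMin cost n
  | fuel+1, pq, cost =>
    match pq with
    | [] => pvAgoalMin cost n
    | e :: rest =>
      let m := rest.foldl pvAminE e
      let pq' := (e :: rest).erase m
      if m.1 > cost m.2.1 m.2.2.1 m.2.2.2 then pvAloop board n fuel pq' cost
      else if m.2.1 = n - 1 ∧ m.2.2.1 = n - 1 then m.1
      else
        let st := (PySem.List.enumerate pvAdelta).foldl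
          (pvAstep board n m.1 m.2.1 m.2.2.1 m.2.2.2) (pq', cost)
        pvAloop board n fuel st.1 st.2

def solution (board : List (List Int)) : Int :=
  let n : Int := board.length
  pvAloop board n (5 + 20 * board.length * board.length)
    [(0, 0, 0, 0), (0, 0, 0, 1), (0, 0, 0, 2), (0, 0, 0, 3)]
    (fun r c _ => if r = 0 ∧ c = 0 then 0 else 1000000000)

-- ===== PORT B =====

def pvBwall (board : List (List Int)) (r c : Int) : Bool :=
  PySem.List.pyGetD (PySem.List.pyGetD board r []) c 0 == 1

def pvBdelta : List (Int × Int) := [(-1, 0), (1, 0), (0, -1), (0, 1)]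

def pvBset (f : Int → Int → Int → Int) (r c d v : Int) : Int → Int → Int → Int :=
  fun r' c' d' => if r' = r ∧ c' = c ∧ d' = d then v else f r' c' d'

-- body of 'for nd, (dr, dc) in enumerate(delta)' of Source B
def pvBrelax (board : List (List Int)) (n r c d base : Int)
    (st : (Int → Int → Int → Int) × Bool) (p : Int × Int × Int) :
    (Int → Int → Int → Int) × Bool :=
  let nd := p.1
  let nr := r + p.2.1
  let nc := c + p.2.2
  if 0 ≤ nr ∧ nr < n ∧ 0 ≤ nc ∧ nc < n then
    if pvBwall board nr nc then st
    else
      let w : Int := if d = nd then 100 else 600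
      if base + w < st.1 nr nc nd then (pvBset st.1 nr nc nd (base + w), true)
      else st
  else st

-- one full sweep over all states (one iteration of the 'while changed' body)
def pvBsweep (board : List (List Int)) (n : Int) (cost : Int → Int → Int → Int) :
    (Int → Int → Int → Int) × Bool :=
  (PySem.List.pyRange 0 n 1).foldl (fun st r =>
    (PySem.List.pyRange 0 n 1).foldl (fun st c =>
      (PySem.List.pyRange 0 4 1).foldl (fun st d =>
        (PySem.List.enumerate pvBdelta).foldl
          (pvBrelax board n r c d (st.1 r c d)) st) st) st) (cost, false)

-- the 'while changed' loop; fuel is a proved upper bound on the number of sweeps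
def pvBloop (board : List (List Int)) (n : Int) :
    Nat → (Int → Int → Int → Int) → (Int → Int → Int → Int)
  | 0, cost => cost
  | fuel+1, cost =>
    let sw := pvBsweep board n cost
    if sw.2 then pvBloop board n fuel sw.1 else sw.1

def solution_alt (board : List (List Int)) : Int :=
  let n : Int := board.length
  let final := pvBloop board n (4 * board.length * board.length * 1000000000 + 1)
    (fun r c _ => if r = 0 ∧ c = 0 then 0 else 1000000000)
  min (min (min (final (n-1) (n-1) 0) (final (n-1) (n-1) 1)) (final (n-1) (n-1) 2)) (final (n-1) (n-1) 3)

-- ===== PRECONDITION & SPEC =====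
-- Pre_ excludes boards on which the Python A raises: the empty board (IndexError building the
-- start states) and, for n ≥ 2, ragged boards with a row shorter than n (board[nr][nc] raises
-- IndexError when a neighbour probe reaches the missing cells; on the rare ragged boards whose
-- short rows are never probed A returns, and those are excluded too — see the cite).
def Pre_solution (board : List (List Int)) : Prop :=
  1 ≤ board.length ∧ (board.length = 1 ∨ ∀ row ∈ board, board.length ≤ row.length)
instance (board : List (List Int)) : Decidable (Pre_solution board) := by
  unfold Pre_solution; infer_instance

def pvWitness_solution : List (List Int) := [[0, 0], [0, 0]]

def Spec_solution (board : List (List Int)) (out : Int) : Prop := out = solution_alt board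
instance (board : List (List Int)) (out : Int) : Decidable (Spec_solution board out) := by
  unfold Spec_solution; infer_instance

-- ===== CLAIM (what is proved, stated in full; the proofs are below) =====
def Claim_equal_solution : Prop := ∀ (board : List (List Int)), Dom_solution board → Pre_solution board → Spec_solution board (solution board)

-- ===== LEMMAS AND PROOFS =====

-- ---- shared model: states, edges, derivable labels ----

def pvINF : Int := 1000000000

def pvInit (s : Int × Int × Int) : Int := if s.1 = 0 ∧ s.2.1 = 0 then 0 else pvINF

def pvRead (f : Int → Int → Int → Int) (s : Int × Int × Int) : Int := f s.1 s.2.1 s.2.2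

def pvInSp (n : Int) (s : Int × Int × Int) : Prop :=
  0 ≤ s.1 ∧ s.1 < n ∧ 0 ≤ s.2.1 ∧ s.2.1 < n ∧ 0 ≤ s.2.2 ∧ s.2.2 < 4

def pvDir (d : Int) : Int × Int :=
  if d = 0 then (-1, 0) else if d = 1 then (1, 0) else if d = 2 then (0, -1) else (0, 1)

def pvW (d nd : Int) : Int := if d = nd then 100 else 600

def pvEdge (board : List (List Int)) (p s : Int × Int × Int) (w : Int) : Prop :=
  0 ≤ s.2.2 ∧ s.2.2 < 4 ∧ s.1 = p.1 + (pvDir s.2.2).1 ∧ s.2.1 = p.2.1 + (pvDir s.2.2).2 ∧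
  0 ≤ s.1 ∧ s.1 < (board.length : Int) ∧ 0 ≤ s.2.1 ∧ s.2.1 < (board.length : Int) ∧
  pvAwall board s.1 s.2.1 = false ∧ w = pvW p.2.2 s.2.2

inductive pvDeriv (board : List (List Int)) : Int × Int × Int → Int → Prop
  | start (d : Int) : 0 ≤ d → d < 4 → pvDeriv board (0, 0, d) 0
  | step {p s : Int × Int × Int} {v w : Int} :
      pvDeriv board p v → pvEdge board p s w → pvDeriv board s (v + w)

-- table invariant shared by both algorithms
def pvPinv (board : List (List Int)) (c : Int → Int → Int → Int) : Prop :=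
  ∀ s : Int × Int × Int,
    pvRead c s ≤ pvInit s ∧ 0 ≤ pvRead c s ∧
    (pvRead c s = pvInit s ∨ pvDeriv board s (pvRead c s))

def pvRelaxed (board : List (List Int)) (c : Int → Int → Int → Int) : Prop :=
  ∀ p s w, pvInSp (board.length : Int) p → pvEdge board p s w →
    pvRead c s ≤ pvRead c p + w

noncomputable def pvS (n : Int) : Finset (Int × Int × Int) :=
  (Finset.Icc 0 (n-1)) ×ˢ ((Finset.Icc 0 (n-1)) ×ˢ (Finset.Icc 0 3))

noncomputable def pvSum (n : Int) (c : Int → Int → Int → Int) : Nat :=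
  ∑ s ∈ pvS n, (pvRead c s).toNat

def pvCost0 : Int → Int → Int → Int := fun r c _ => if r = 0 ∧ c = 0 then 0 else 1000000000

-- B's final table and the distance function δ
def pvBfinal (board : List (List Int)) : Int → Int → Int → Int :=
  pvBloop board (board.length : Int) (4 * board.length * board.length * 1000000000 + 1) pvCost0

def pvDel (board : List (List Int)) (s : Int × Int × Int) : Int := pvRead (pvBfinal board) s

-- ---- basic facts ----

lemma pvW_pos (d nd : Int) : 0 < pvW d nd := by
  unfold pvW; split <;> norm_num

lemma pvInit_le_INF (s : Int × Int × Int) : pvInit s ≤ pvINF := by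
  unfold pvInit pvINF; split <;> norm_num

lemma pvEdge_w_pos {board p s w} (he : pvEdge board p s w) : 0 < w := by
  obtain ⟨-, -, -, -, -, -, -, -, -, hw⟩ := he
  subst hw; exact pvW_pos _ _

lemma pvDeriv_nonneg {board s v} (h : pvDeriv board s v) : 0 ≤ v := by
  induction h with
  | start => omega
  | step _ he ih => have := pvEdge_w_pos he; omega

lemma pvDeriv_inSp {board s v} (hn : 1 ≤ board.length) (h : pvDeriv board s v) :
    pvInSp (board.length : Int) s := by
  induction h with
  | start d h1 h2 =>
    refine ⟨le_refl _, ?_, le_refl _, ?_, h1, h2⟩ <;>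
      · show (0:Int) < (board.length : Int); exact_mod_cast hn
  | step _ he _ =>
    obtain ⟨h1, h2, -, -, h3, h4, h5, h6, -, -⟩ := he
    exact ⟨h3, h4, h5, h6, h1, h2⟩

lemma pvMemS {n : Int} {s : Int × Int × Int} : s ∈ pvS n ↔ pvInSp n s := by
  unfold pvS pvInSp
  simp [Finset.mem_product, Finset.mem_Icc]
  omega

-- generic foldl chaining lemma
lemma pvFoldlRel {α σ : Type} (R : σ → σ → Prop)
    (hrefl : ∀ s, R s s) (htrans : ∀ a b c, R a b → R b c → R a c)
    (f : σ → α → σ) (l : List α) (h : ∀ s a, a ∈ l → R s (f s a)) (s0 : σ) :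
    R s0 (l.foldl f s0) := by
  induction l generalizing s0 with
  | nil => exact hrefl s0
  | cons x xs ih =>
    exact htrans _ _ _ (h s0 x (by simp)) (ih (fun s a ha => h s a (by simp [ha])) _)

-- ===== B-side development =====

lemma pvBset_read (f : Int → Int → Int → Int) (r c d v : Int) (s : Int × Int × Int) :
    pvRead (pvBset f r c d v) s = if s.1 = r ∧ s.2.1 = c ∧ s.2.2 = d then v else pvRead f s := rfl

lemma pvTriple_eq {s : Int × Int × Int} {r c d : Int} :
    (s.1 = r ∧ s.2.1 = c ∧ s.2.2 = d) ↔ s = (r, c, d) := by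
  obtain ⟨a, b, e⟩ := s; simp [Prod.ext_iff]

lemma pvWall_eq (board : List (List Int)) (r c : Int) : pvBwall board r c = pvAwall board r c := rfl

-- the chaining relation for B's sweep
def pvBR (board : List (List Int)) (n : Int) (st st' : (Int → Int → Int → Int) × Bool) : Prop :=
  pvPinv board st.1 →
    pvPinv board st'.1 ∧ (∀ s, pvRead st'.1 s ≤ pvRead st.1 s) ∧
    (st'.2 = false → st' = st) ∧
    (st.2 = true → st'.2 = true) ∧
    (st.2 = false → st'.2 = true → pvSum n st'.1 < pvSum n st.1)

lemma pvBR_refl (board n) : ∀ st, pvBR board n st st := by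
  intro st h
  exact ⟨h, fun s => le_refl _, fun _ => rfl, fun h => h, fun h1 h2 => by simp_all⟩

lemma pvBR_trans (board n) : ∀ a b c, pvBR board n a b → pvBR board n b c → pvBR board n a c := by
  intro a b c hab hbc hPa
  obtain ⟨hPb, hle1, hf1, hm1, hs1⟩ := hab hPa
  obtain ⟨hPc, hle2, hf2, hm2, hs2⟩ := hbc hPb
  refine ⟨hPc, fun s => le_trans (hle2 s) (hle1 s), ?_, fun h => hm2 (hm1 h), ?_⟩
  · intro hc
    have hb : b.2 = false := by
      by_contra hb
      have := hm2 (by revert hb; cases b.2 <;> simp)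
      simp [hc] at this
    have e1 := hf1 hb
    have e2 := hf2 hc
    rw [e2, e1]
  · intro ha hc
    by_cases hb : b.2 = true
    · have := hs1 ha hb
      have hle : pvSum n c.1 ≤ pvSum n b.1 := by
        refine Finset.sum_le_sum ?_
        intro i _
        have := hle2 i
        omega
      unfold pvSum at *
      omega
    · have hb' : b.2 = false := by revert hb; cases b.2 <;> simp
      have e1 := hf1 hb'
      have h2 := hs2 hb' hc
      rw [e1] at h2
      exact h2

-- a single relaxation item preserves the chaining relation
lemma pvBwrite_R (board : List (List Int)) (r c d nd dr dc : Int) (base : Int)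
    (hdir : 0 ≤ nd ∧ nd < 4 ∧ pvDir nd = (dr, dc)) (hd : 0 ≤ d ∧ d < 4)
    (hbase : base = pvInit (r, c, d) ∨ pvDeriv board (r, c, d) base)
    (hb0 : 0 ≤ base) (st : (Int → Int → Int → Int) × Bool) :
    pvBR board (board.length : Int) st
      (pvBrelax board (board.length : Int) r c d base st (nd, dr, dc)) := by
  obtain ⟨hnd0, hnd4, hdir⟩ := hdir
  unfold pvBrelax
  dsimp only
  set w : Int := if d = nd then 100 else 600 with hw
  split_ifs with hbnd hwall himp
  · exact pvBR_refl board _ st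
  · -- write case
    intro hP
    have hread : st.1 (r + dr) (c + dc) nd = pvRead st.1 (r + dr, c + dc, nd) := rfl
    have hw0 : (0:Int) < w := by rw [hw]; split <;> norm_num
    have hwW : w = pvW d nd := rfl
    have hle_init := (hP (r + dr, c + dc, nd)).1
    -- base is derivable (the INF case is impossible because the write improved something)
    have hder : pvDeriv board (r, c, d) base := by
      rcases hbase with hbase | hbase
      · unfold pvInit at hbase
        by_cases hrc : r = 0 ∧ c = 0
        · rw [if_pos hrc] at hbase
          subst hbase
          obtain ⟨rfl, rfl⟩ := hrc
          exact pvDeriv.start (board := board) d hd.1 hd.2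
        · rw [if_neg hrc] at hbase
          exfalso
          have h2 : pvInit (r + dr, c + dc, nd) ≤ pvINF := pvInit_le_INF _
          rw [hread] at himp
          omega
      · exact hbase
    have hedge : pvEdge board (r, c, d) (r + dr, c + dc, nd) w := by
      refine ⟨hnd0, hnd4, ?_, ?_, hbnd.1, hbnd.2.1, hbnd.2.2.1, hbnd.2.2.2, ?_, hwW⟩
      · show r + dr = r + (pvDir nd).1; rw [hdir]
      · show c + dc = c + (pvDir nd).2; rw [hdir]
      · simpa [pvWall_eq] using hwall
    have hderiv2 : pvDeriv board (r + dr, c + dc, nd) (base + w) := pvDeriv.step hder hedge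
    refine ⟨?_, ?_, by simp, by simp, ?_⟩
    · -- Pinv preserved
      intro s
      simp only [pvBset_read, pvTriple_eq]
      split_ifs with hs
      · subst hs
        rw [hread] at himp
        exact ⟨by omega, by omega, Or.inr hderiv2⟩
      · exact hP s
    · -- pointwise ≤
      intro s
      simp only [pvBset_read, pvTriple_eq]
      split_ifs with hs
      · subst hs; rw [hread] at himp; omega
      · exact le_refl _
    · -- strict sum decrease
      intro _ _
      unfold pvSum
      apply Finset.sum_lt_sum
      · intro i _
        simp only [pvBset_read, pvTriple_eq]
        split_ifs with hs
        · subst hs; rw [hread] at himp; omega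
        · exact le_refl _
      · refine ⟨(r + dr, c + dc, nd), ?_, ?_⟩
        · rw [pvMemS]
          exact ⟨hbnd.1, hbnd.2.1, hbnd.2.2.1, hbnd.2.2.2, hnd0, hnd4⟩
        · have hv : pvRead (pvBset st.1 (r + dr) (c + dc) nd (base + w)) (r + dr, c + dc, nd)
              = base + w := by simp [pvBset_read]
          rw [hv, ← hread]
          omega
  · exact pvBR_refl board _ st
  · exact pvBR_refl board _ st

lemma pvBrelax_R (board : List (List Int)) (r c d : Int) (base : Int)
    (hd : 0 ≤ d ∧ d < 4)
    (hbase : base = pvInit (r, c, d) ∨ pvDeriv board (r, c, d) base)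
    (hb0 : 0 ≤ base) :
    ∀ st p, p ∈ PySem.List.enumerate pvBdelta →
      pvBR board (board.length : Int) st (pvBrelax board (board.length : Int) r c d base st p) := by
  intro st p hp
  simp only [pvBdelta, PySem.List.enumerate_cons, PySem.List.enumerate_nil] at hp
  norm_num at hp
  rcases hp with rfl | rfl | rfl | rfl <;>
    exact pvBwrite_R board r c d _ _ _ base ⟨by norm_num, by norm_num, by decide⟩ hd hbase hb0 st

lemma pvBinner_R (board : List (List Int)) (r c d : Int) (hd : 0 ≤ d ∧ d < 4)
    (st : (Int → Int → Int → Int) × Bool) :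
    pvBR board (board.length : Int) st
      ((PySem.List.enumerate pvBdelta).foldl
        (pvBrelax board (board.length : Int) r c d (st.1 r c d)) st) := by
  intro hP
  have hb : pvRead st.1 (r, c, d) = pvInit (r, c, d) ∨ pvDeriv board (r, c, d) (pvRead st.1 (r, c, d)) :=
    (hP (r, c, d)).2.2
  have hb0 : 0 ≤ pvRead st.1 (r, c, d) := (hP (r, c, d)).2.1
  exact pvFoldlRel _ (pvBR_refl board _) (pvBR_trans board _) _ _
    (fun s p hp => pvBrelax_R board r c d _ hd hb hb0 s p hp) st hP

lemma pvBsweep_R (board : List (List Int)) (cost : Int → Int → Int → Int) :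
    pvBR board (board.length : Int) (cost, false) (pvBsweep board (board.length : Int) cost) := by
  unfold pvBsweep
  apply pvFoldlRel _ (pvBR_refl board _) (pvBR_trans board _)
  intro st r _
  apply pvFoldlRel _ (pvBR_refl board _) (pvBR_trans board _)
  intro st c _
  apply pvFoldlRel _ (pvBR_refl board _) (pvBR_trans board _)
  intro st d hd
  rw [PySem.List.mem_pyRange_one] at hd
  exact pvBinner_R board r c d hd st

lemma pvFoldlMono {α : Type} {T : Type} (f : (T × Bool) → α → (T × Bool)) (l : List α)
    (hitem : ∀ s a, a ∈ l → s.2 = true → (f s a).2 = true) :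
    ∀ s0, s0.2 = true → (l.foldl f s0).2 = true := by
  induction l with
  | nil => intro s0 h; simpa using h
  | cons x xs ih =>
    intro s0 h
    exact ih (fun s a ha => hitem s a (by simp [ha])) _ (hitem s0 x (by simp) h)

lemma pvFoldlFix {α : Type} {T : Type} (f : (T × Bool) → α → (T × Bool)) (l : List α)
    (hitem : ∀ s a, a ∈ l → ((f s a).2 = false → f s a = s) ∧ (s.2 = true → (f s a).2 = true)) :
    ∀ s0, (l.foldl f s0).2 = false → (l.foldl f s0) = s0 ∧ ∀ a ∈ l, f s0 a = s0 := by
  induction l with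
  | nil => intro s0 _; simp
  | cons x xs ih =>
    intro s0 hfin
    simp only [List.foldl_cons] at hfin ⊢
    have h1 : (f s0 x).2 = false := by
      by_contra hne
      have ht : (f s0 x).2 = true := by revert hne; cases (f s0 x).2 <;> simp
      have := pvFoldlMono f xs (fun s a ha hs => (hitem s a (by simp [ha])).2 hs) _ ht
      simp [hfin] at this
    have h2 : f s0 x = s0 := (hitem s0 x (by simp)).1 h1
    rw [h2] at hfin ⊢
    obtain ⟨ha, hb⟩ := ih (fun s a ha => hitem s a (by simp [ha])) s0 hfin
    exact ⟨ha, fun a haa => by rcases List.mem_cons.mp haa with rfl | hm; exact h2; exact hb a hm⟩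

lemma pvBrelax_fixmono (board : List (List Int)) (n r c d base : Int) :
    ∀ (st : (Int → Int → Int → Int) × Bool) p, p ∈ PySem.List.enumerate pvBdelta →
      ((pvBrelax board n r c d base st p).2 = false → pvBrelax board n r c d base st p = st) ∧
      (st.2 = true → (pvBrelax board n r c d base st p).2 = true) := by
  intro st p _
  unfold pvBrelax
  dsimp only
  split_ifs <;> simp

-- a sweep that reports no change leaves the table relaxed
lemma pvBsweep_false_relaxed (board : List (List Int)) (cost : Int → Int → Int → Int)
    (h : (pvBsweep board (board.length : Int) cost).2 = false) :
    pvRelaxed board cost := by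
  set n : Int := (board.length : Int) with hn
  have monoRelax : ∀ (r c d base : Int) st p, st.2 = true →
      (pvBrelax board n r c d base st p).2 = true := by
    intro r c d base st p hst
    unfold pvBrelax; dsimp only; split_ifs <;> simp [hst]
  have monoD : ∀ (r c : Int) (st : (Int → Int → Int → Int) × Bool) (d : Int), st.2 = true →
      ((PySem.List.enumerate pvBdelta).foldl (pvBrelax board n r c d (st.1 r c d)) st).2 = true :=
    fun r c st d hst => pvFoldlMono _ _ (fun s p _ hs => monoRelax r c d _ s p hs) st hst
  have monoC : ∀ (r : Int) (st : (Int → Int → Int → Int) × Bool) (c : Int), st.2 = true →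
      ((PySem.List.pyRange 0 4 1).foldl (fun st d =>
        (PySem.List.enumerate pvBdelta).foldl (pvBrelax board n r c d (st.1 r c d)) st) st).2 = true :=
    fun r st c hst => pvFoldlMono _ _ (fun s d _ hs => monoD r c s d hs) st hst
  have monoR : ∀ (st : (Int → Int → Int → Int) × Bool) (r : Int), st.2 = true →
      ((PySem.List.pyRange 0 n 1).foldl (fun st c =>
        (PySem.List.pyRange 0 4 1).foldl (fun st d =>
          (PySem.List.enumerate pvBdelta).foldl (pvBrelax board n r c d (st.1 r c d)) st) st) st).2 = true :=
    fun st r hst => pvFoldlMono _ _ (fun s c _ hs => monoC r s c hs) st hst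
  have hitemD : ∀ (r c : Int) (s : (Int → Int → Int → Int) × Bool) (d : Int),
      (((PySem.List.enumerate pvBdelta).foldl (pvBrelax board n r c d (s.1 r c d)) s).2 = false →
        (PySem.List.enumerate pvBdelta).foldl (pvBrelax board n r c d (s.1 r c d)) s = s) := by
    intro r c s d hf
    exact (pvFoldlFix _ _ (fun st p hp => ⟨(pvBrelax_fixmono board n r c d _ st p hp).1,
      fun ht => monoRelax r c d _ st p ht⟩) s hf).1
  have hitemC : ∀ (r : Int) (s : (Int → Int → Int → Int) × Bool) (c : Int),
      (((PySem.List.pyRange 0 4 1).foldl (fun st d =>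
          (PySem.List.enumerate pvBdelta).foldl (pvBrelax board n r c d (st.1 r c d)) st) s).2 = false →
        (PySem.List.pyRange 0 4 1).foldl (fun st d =>
          (PySem.List.enumerate pvBdelta).foldl (pvBrelax board n r c d (st.1 r c d)) st) s = s) := by
    intro r s c hf
    exact (pvFoldlFix _ _ (fun st d _ => ⟨hitemD r c st d, fun ht => monoD r c st d ht⟩) s hf).1
  unfold pvBsweep at h
  obtain ⟨-, hR⟩ := pvFoldlFix _ _
    (fun st r _ => ⟨fun hf => (pvFoldlFix _ _
        (fun s c _ => ⟨hitemC r s c, fun ht => monoC r s c ht⟩) st hf).1,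
      fun ht => monoR st r ht⟩) (cost, false) h
  -- extract the per-item facts at the innermost level
  have hfinal : ∀ r c d : Int, 0 ≤ r → r < n → 0 ≤ c → c < n → 0 ≤ d → d < 4 →
      ∀ p ∈ PySem.List.enumerate pvBdelta,
        pvBrelax board n r c d (cost r c d) (cost, false) p = (cost, false) := by
    intro r c d hr1 hr2 hc1 hc2 hd1 hd2 p hp
    have hr := hR r (by rw [PySem.List.mem_pyRange_one]; exact ⟨hr1, hr2⟩)
    have hrf : (((PySem.List.pyRange 0 n 1).foldl (fun st c =>
        (PySem.List.pyRange 0 4 1).foldl (fun st d =>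
          (PySem.List.enumerate pvBdelta).foldl (pvBrelax board n r c d (st.1 r c d)) st) st)
        ((cost, false) : (Int → Int → Int → Int) × Bool))).2 = false := by rw [hr]
    obtain ⟨-, hC⟩ := pvFoldlFix _ _
      (fun s c _ => ⟨hitemC r s c, fun ht => monoC r s c ht⟩) (cost, false) hrf
    have hc := hC c (by rw [PySem.List.mem_pyRange_one]; exact ⟨hc1, hc2⟩)
    have hcf : (((PySem.List.pyRange 0 4 1).foldl (fun st d =>
        (PySem.List.enumerate pvBdelta).foldl (pvBrelax board n r c d (st.1 r c d)) st)
        ((cost, false) : (Int → Int → Int → Int) × Bool))).2 = false := by rw [hc]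
    obtain ⟨-, hD⟩ := pvFoldlFix _ _
      (fun st d _ => ⟨hitemD r c st d, fun ht => monoD r c st d ht⟩) (cost, false) hcf
    have hd := hD d (by rw [PySem.List.mem_pyRange_one]; exact ⟨hd1, hd2⟩)
    have hdf : (((PySem.List.enumerate pvBdelta).foldl (pvBrelax board n r c d (cost r c d))
        ((cost, false) : (Int → Int → Int → Int) × Bool))).2 = false := by rw [hd]
    obtain ⟨-, hE⟩ := pvFoldlFix _ _ (fun st p hp => ⟨(pvBrelax_fixmono board n r c d _ st p hp).1,
      fun ht => monoRelax r c d _ st p ht⟩) (cost, false) hdf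
    exact hE p hp
  -- now read off relaxedness
  intro p s w hsp hedge
  obtain ⟨r, c, d⟩ := p
  obtain ⟨s1, s2, s3⟩ := s
  obtain ⟨hr1, hr2, hc1, hc2, hd1, hd2⟩ := hsp
  obtain ⟨hnd0, hnd4, hs1, hs2, hb1, hb2, hb3, hb4, hwall, hw⟩ := hedge
  simp only at hs1 hs2 hwall hw hb1 hb2 hb3 hb4 hnd0 hnd4 hr1 hr2 hc1 hc2 hd1 hd2
  have hmem : ((s3 : Int), pvDir s3) ∈ PySem.List.enumerate pvBdelta := by
    interval_cases s3 <;> decide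
  have hfix := hfinal r c d hr1 hr2 hc1 hc2 hd1 hd2 (s3, pvDir s3) hmem
  unfold pvBrelax at hfix
  dsimp only at hfix
  rw [← hs1, ← hs2] at hfix
  rw [if_pos ⟨hb1, hb2, hb3, hb4⟩] at hfix
  rw [pvWall_eq, hwall] at hfix
  rw [if_neg (by simp)] at hfix
  by_cases himp : cost r c d + (if d = s3 then (100:Int) else 600) < cost s1 s2 s3
  · rw [if_pos himp] at hfix
    exact absurd (congrArg Prod.snd hfix) (by simp)
  · push Not at himp
    simpa [pvRead, hw, pvW] using himp

lemma pvBloop_props (board : List (List Int)) :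
    ∀ fuel cost, pvPinv board cost → pvSum (board.length : Int) cost < fuel →
      pvPinv board (pvBloop board (board.length : Int) fuel cost) ∧
      pvRelaxed board (pvBloop board (board.length : Int) fuel cost) := by
  intro fuel
  induction fuel with
  | zero => intro cost _ hs; omega
  | succ f ih =>
    intro cost hP hs
    have hR := pvBsweep_R board cost hP
    obtain ⟨hP', hle, hfix, -, hstrict⟩ := hR
    have heq2 : pvBloop board (board.length : Int) (f+1) cost =
        if (pvBsweep board (board.length : Int) cost).2
        then pvBloop board (board.length : Int) f (pvBsweep board (board.length : Int) cost).1
        else (pvBsweep board (board.length : Int) cost).1 := rfl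
    rw [heq2]
    cases hsw : (pvBsweep board (board.length : Int) cost).2 with
    | false =>
      have heq := hfix hsw
      simp only [Bool.false_eq_true, if_false]
      have h1 : (pvBsweep board (board.length : Int) cost).1 = cost := by rw [heq]
      rw [h1]
      exact ⟨hP, pvBsweep_false_relaxed board cost hsw⟩
    | true =>
      have hlt := hstrict rfl hsw
      dsimp only at hlt
      rw [if_pos rfl]
      exact ih _ hP' (by omega)

lemma pvPinv_cost0 (board : List (List Int)) : pvPinv board pvCost0 := by
  intro s
  refine ⟨le_refl _, ?_, Or.inl rfl⟩
  · unfold pvRead pvCost0; split <;> norm_num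

lemma pvS_card (board : List (List Int)) :
    (pvS (board.length : Int)).card = board.length * (board.length * 4) := by
  unfold pvS
  rw [Finset.card_product, Finset.card_product]
  rw [Int.card_Icc, Int.card_Icc]
  have h1 : ((board.length : Int) - 1 + 1 - 0).toNat = board.length := by omega
  have h2 : ((3:Int) + 1 - 0).toNat = 4 := rfl
  rw [h1, h2]

lemma pvSum_cost0_lt (board : List (List Int)) :
    pvSum (board.length : Int) pvCost0 < 4 * board.length * board.length * 1000000000 + 1 := by
  have hcard := pvS_card board
  have hb : ∀ s ∈ pvS (board.length : Int), (pvRead pvCost0 s).toNat ≤ 1000000000 := by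
    intro s _
    unfold pvRead pvCost0
    split <;> simp
  have := Finset.sum_le_card_nsmul _ _ 1000000000 hb
  unfold pvSum
  calc ∑ s ∈ pvS (board.length : Int), (pvRead pvCost0 s).toNat
      ≤ (pvS (board.length : Int)).card • 1000000000 := this
    _ = board.length * (board.length * 4) * 1000000000 := by rw [hcard]; simp [smul_eq_mul]
    _ < 4 * board.length * board.length * 1000000000 + 1 := by ring_nf; omega

lemma pvBfinal_props (board : List (List Int)) :
    pvPinv board (pvBfinal board) ∧ pvRelaxed board (pvBfinal board) := by
  unfold pvBfinal
  exact pvBloop_props board _ pvCost0 (pvPinv_cost0 board) (pvSum_cost0_lt board)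

-- δ is a lower bound of every derivable label
lemma pvDel_le {board : List (List Int)} (hn : 1 ≤ board.length) :
    ∀ s v, pvDeriv board s v → pvDel board s ≤ v := by
  intro s v h
  induction h with
  | start d h1 h2 =>
    have := ((pvBfinal_props board).1 (0, 0, d)).1
    unfold pvDel
    simpa [pvInit] using this
  | step hder he ih =>
    have hsp := pvDeriv_inSp hn hder
    have := (pvBfinal_props board).2 _ _ _ hsp he
    unfold pvDel at *
    omega

lemma pvDel_le_init (board : List (List Int)) (s) : pvDel board s ≤ pvInit s :=
  ((pvBfinal_props board).1 s).1

lemma pvDel_sound (board : List (List Int)) (s) :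
    pvDel board s = pvInit s ∨ pvDeriv board s (pvDel board s) :=
  ((pvBfinal_props board).1 s).2.2

-- ===== A-side development =====

-- the full loop invariant of A's Dijkstra loop, with ghost done-set D
def pvInv (board : List (List Int)) (pq : List (Int × Int × Int × Int))
    (cost : Int → Int → Int → Int) (D : Finset (Int × Int × Int)) : Prop :=
  let n : Int := board.length
  pvPinv board cost ∧ pq.Nodup ∧
  (∀ q ∈ D, pvInSp n q ∧ pvRead cost q = pvDel board q) ∧
  (∀ q ∈ D, ∀ t w, pvEdge board q t w → pvRead cost t ≤ pvRead cost q + w) ∧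
  (∀ t : Int × Int × Int, pvInSp n t → t ∉ D → pvRead cost t < pvINF →
      (pvRead cost t, t.1, t.2.1, t.2.2) ∈ pq) ∧
  (∀ e ∈ pq, let t : Int × Int × Int := (e.2.1, e.2.2.1, e.2.2.2);
      pvDeriv board t e.1 ∧ pvRead cost t ≤ e.1 ∧ e.1 < pvINF ∧ pvInSp n t ∧
      (t ∈ D → pvRead cost t < e.1) ∧ (∀ q ∈ D, pvDel board q ≤ e.1)) ∧
  (∀ d : Int, ((n - 1, n - 1, d) : Int × Int × Int) ∉ D)

-- min-entry extraction facts
lemma pvAminE_cases (a b : Int × Int × Int × Int) : pvAminE a b = a ∨ pvAminE a b = b := by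
  unfold pvAminE; split <;> simp

lemma pvAminE_fst (a b : Int × Int × Int × Int) :
    (pvAminE a b).1 ≤ a.1 ∧ (pvAminE a b).1 ≤ b.1 := by
  unfold pvAminE; split <;> [skip; skip] <;> constructor <;> omega

lemma pvAmin_mem (e : Int × Int × Int × Int) (l : List (Int × Int × Int × Int)) :
    l.foldl pvAminE e ∈ e :: l := by
  induction l generalizing e with
  | nil => simp
  | cons x xs ih =>
    have h := ih (pvAminE e x)
    simp only [List.foldl_cons]
    rcases List.mem_cons.mp h with hh | hh
    · rcases pvAminE_cases e x with h1 | h1 <;> rw [hh, h1] <;> simp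
    · simp [hh]

lemma pvAmin_fst_le (e : Int × Int × Int × Int) (l : List (Int × Int × Int × Int)) :
    ∀ x ∈ e :: l, (l.foldl pvAminE e).1 ≤ x.1 := by
  induction l generalizing e with
  | nil => intro x hx; simp at hx; simp [hx]
  | cons y ys ih =>
    intro x hx
    have h1 := pvAminE_fst e y
    have h2 := ih (pvAminE e y)
    simp only [List.mem_cons] at hx
    rcases hx with rfl | rfl | hx
    · exact le_trans (h2 _ (by simp)) h1.1
    · exact le_trans (h2 _ (by simp)) h1.2
    · exact h2 _ (by simp [hx])

-- the frontier lemma: v := minimal entry value bounds every derivable label of an un-done state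
lemma pvKey (board : List (List Int)) (hn : 1 ≤ board.length)
    (pq : List (Int × Int × Int × Int)) (cost : Int → Int → Int → Int)
    (D : Finset (Int × Int × Int)) (hInv : pvInv board pq cost D)
    (v : Int) (hmin : ∀ x ∈ pq, v ≤ x.1) :
    ∀ t u, pvDeriv board t u → u < pvINF → t ∉ D → v ≤ u := by
  obtain ⟨hP, -, hD, hC, hQ, -, -⟩ := hInv
  intro t u h
  induction h with
  | start d h1 h2 =>
    intro _ hnd
    have hsp := pvDeriv_inSp hn (pvDeriv.start (board := board) d h1 h2)
    have hc0 : pvRead cost (0, 0, d) ≤ 0 := by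
      have := (hP (0, 0, d)).1; simpa [pvInit] using this
    have hlt : pvRead cost (0, 0, d) < pvINF := lt_of_le_of_lt hc0 (by norm_num [pvINF])
    have hm := hmin _ (hQ _ hsp hnd hlt)
    simp only at hm
    omega
  | @step p s' w' v' hder he ih =>
    intro hu hnd
    have hw := pvEdge_w_pos he
    have hsp : pvInSp (board.length : Int) s' := pvDeriv_inSp hn (pvDeriv.step hder he)
    by_cases hpD : p ∈ D
    · have h1 := hC p hpD s' v' he
      have h2 := (hD p hpD).2
      have h3 := pvDel_le hn p w' hder
      have hct : pvRead cost s' ≤ w' + v' := by omega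
      have hlt : pvRead cost s' < pvINF := lt_of_le_of_lt hct hu
      have hm := hmin _ (hQ s' hsp hnd hlt)
      simp only at hm
      omega
    · have hw0 := pvDeriv_nonneg hder
      have := ih (by omega) hpD
      omega

-- with an empty queue the cost table bounds every (finite) derivable label
lemma pvEmptyQ (board : List (List Int)) (hn : 1 ≤ board.length)
    (cost : Int → Int → Int → Int) (D : Finset (Int × Int × Int))
    (hInv : pvInv board [] cost D) :
    ∀ t u, pvDeriv board t u → u < pvINF → pvRead cost t ≤ u := by
  obtain ⟨hP, -, hD, hC, hQ, -, -⟩ := hInv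
  intro t u h
  induction h with
  | start d h1 h2 =>
    intro _
    have := (hP (0, 0, d)).1
    simpa [pvInit] using this
  | @step p s' w' v' hder he ih =>
    intro hu
    have hw := pvEdge_w_pos he
    have hw0 := pvDeriv_nonneg hder
    by_cases hpD : p ∈ D
    · have h1 := hC p hpD s' v' he
      have := ih (by omega)
      omega
    · have hsp := pvDeriv_inSp hn hder
      have hcp : pvRead cost p ≤ w' := ih (by omega)
      have hlt : pvRead cost p < pvINF := by omega
      exact absurd (hQ p hsp hpD hlt) (by simp)

lemma pvEmptyEq (board : List (List Int)) (hn : 1 ≤ board.length)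
    (cost : Int → Int → Int → Int) (D : Finset (Int × Int × Int))
    (hInv : pvInv board [] cost D) :
    ∀ t, pvRead cost t = pvDel board t := by
  intro t
  have hP := hInv.1
  have hup : pvRead cost t ≤ pvDel board t := by
    rcases pvDel_sound board t with hs | hs
    · have h1 := (hP t).1
      rw [hs]
      exact h1
    · by_cases hδ : pvDel board t < pvINF
      · exact pvEmptyQ board hn cost D hInv t _ hs hδ
      · have h1 := (hP t).1
        have h2 := pvInit_le_INF t
        omega
  have hdn : pvDel board t ≤ pvRead cost t := by
    rcases (hP t).2.2 with hs | hs
    · rw [hs]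
      exact pvDel_le_init board t
    · exact pvDel_le hn t _ hs
  omega

-- ---- processing a popped state ----

lemma pvAset_read (f : Int → Int → Int → Int) (r c d v : Int) (s : Int × Int × Int) :
    pvRead (pvAset f r c d v) s = if s.1 = r ∧ s.2.1 = c ∧ s.2.2 = d then v else pvRead f s := rfl

def pvEState (e : Int × Int × Int × Int) : Int × Int × Int := (e.2.1, e.2.2.1, e.2.2.2)

-- invariant holding at each point of the four-direction relaxation fold of A
def pvMid (board : List (List Int)) (D' : Finset (Int × Int × Int)) (s0 : Int × Int × Int)
    (st : List (Int × Int × Int × Int) × (Int → Int → Int → Int)) : Prop :=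
  pvPinv board st.2 ∧ st.1.Nodup ∧
  (∀ q ∈ D', pvInSp (board.length : Int) q ∧ pvRead st.2 q = pvDel board q) ∧
  (∀ q ∈ D', q ≠ s0 → ∀ t w, pvEdge board q t w → pvRead st.2 t ≤ pvRead st.2 q + w) ∧
  (∀ t, pvInSp (board.length : Int) t → t ∉ D' → pvRead st.2 t < pvINF →
      (pvRead st.2 t, t.1, t.2.1, t.2.2) ∈ st.1) ∧
  (∀ e ∈ st.1, pvDeriv board (pvEState e) e.1 ∧ pvRead st.2 (pvEState e) ≤ e.1 ∧ e.1 < pvINF ∧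
      pvInSp (board.length : Int) (pvEState e) ∧
      (pvEState e ∈ D' → pvRead st.2 (pvEState e) < e.1) ∧
      (∀ q ∈ D', pvDel board q ≤ e.1))

lemma pvAstep_mid (board : List (List Int)) (D' : Finset (Int × Int × Int))
    (v r c d nd dr dc : Int)
    (hder : pvDeriv board (r, c, d) v) (hv0 : 0 ≤ v)
    (hDv : ∀ q ∈ D', pvDel board q ≤ v)
    (hfacts : 0 ≤ nd ∧ nd < 4 ∧ pvDir nd = (dr, dc))
    (st : List (Int × Int × Int × Int) × (Int → Int → Int → Int))
    (hmid : pvMid board D' (r, c, d) st) :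
    pvMid board D' (r, c, d) (pvAstep board (board.length : Int) v r c d st (nd, dr, dc)) ∧
    (∀ t, pvRead (pvAstep board (board.length : Int) v r c d st (nd, dr, dc)).2 t ≤ pvRead st.2 t) ∧
    (pvAstep board (board.length : Int) v r c d st (nd, dr, dc)).1.length ≤ st.1.length + 1 ∧
    (∀ t w, pvEdge board (r, c, d) t w → t.2.2 = nd →
      pvRead (pvAstep board (board.length : Int) v r c d st (nd, dr, dc)).2 t ≤ v + w) := by
  obtain ⟨hnd0, hnd4, hdir⟩ := hfacts
  obtain ⟨hP, hND, hB, hC, hQ, hE⟩ := hmid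
  unfold pvAstep
  dsimp only
  set w : Int := if d = nd then 100 else 600 with hw
  have hw0 : (0:Int) < w := by rw [hw]; split <;> norm_num
  have hwW : w = pvW d nd := rfl
  -- a helper for the "unchanged" branches
  have hsame : ∀ (h4 : ∀ t w', pvEdge board (r, c, d) t w' → t.2.2 = nd →
        pvRead st.2 t ≤ v + w'),
      pvMid board D' (r, c, d) st ∧ (∀ t, pvRead st.2 t ≤ pvRead st.2 t) ∧
      st.1.length ≤ st.1.length + 1 ∧ (∀ t w', pvEdge board (r, c, d) t w' → t.2.2 = nd →
        pvRead st.2 t ≤ v + w') := by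
    intro h4
    exact ⟨⟨hP, hND, hB, hC, hQ, hE⟩, fun t => le_refl _, by omega, h4⟩
  -- decompose a relevant edge target
  have htgt : ∀ (t : Int × Int × Int) (w' : Int), pvEdge board (r, c, d) t w' → t.2.2 = nd →
      t = (r + dr, c + dc, nd) ∧ w' = w ∧ 0 ≤ r + dr ∧ r + dr < (board.length : Int) ∧
      0 ≤ c + dc ∧ c + dc < (board.length : Int) ∧ pvAwall board (r + dr) (c + dc) = false := by
    intro t w' he hnd'
    obtain ⟨t1, t2, t3⟩ := t
    obtain ⟨e1, e2, e3, e4, e5, e6, e7, e8, e9, e10⟩ := he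
    simp only at e3 e4 e9 e10 hnd' e5 e6 e7 e8
    subst hnd'
    rw [hdir] at e3 e4
    simp only at e3 e4
    subst e3; subst e4
    refine ⟨rfl, ?_, e5, e6, e7, e8, e9⟩
    rw [e10, hwW]
  split_ifs with hbnd hwall himp
  · -- wall: no relevant edge exists
    apply hsame
    intro t w' he hnd'
    obtain ⟨-, -, -, -, -, -, hwf⟩ := htgt t w' he hnd'
    rw [hwf] at hwall
    simp at hwall
  · -- write
    have hread : st.2 (r + dr) (c + dc) nd = pvRead st.2 (r + dr, c + dc, nd) := rfl
    rw [hread] at himp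
    have hle_init := (hP (r + dr, c + dc, nd)).1
    have hinf := pvInit_le_INF (r + dr, c + dc, nd)
    have hedge : pvEdge board (r, c, d) (r + dr, c + dc, nd) w := by
      refine ⟨hnd0, hnd4, ?_, ?_, hbnd.1, hbnd.2.1, hbnd.2.2.1, hbnd.2.2.2, ?_, hwW⟩
      · show r + dr = r + (pvDir nd).1; rw [hdir]
      · show c + dc = c + (pvDir nd).2; rw [hdir]
      · simpa using hwall
    have hderiv2 : pvDeriv board (r + dr, c + dc, nd) (v + w) := pvDeriv.step hder hedge
    have ht0 : ((r + dr, c + dc, nd) : Int × Int × Int) ∉ D' := by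
      intro hmem
      have h1 := (hB _ hmem).2
      have h2 := hDv _ hmem
      rw [h1] at himp
      linarith
    have hfresh : ((v + w, r + dr, c + dc, nd) : Int × Int × Int × Int) ∉ st.1 := by
      intro hmem
      have := (hE _ hmem).2.1
      simp only [pvEState] at this
      omega
    refine ⟨⟨?_, ?_, ?_, ?_, ?_, ?_⟩, ?_, by simp, ?_⟩
    · -- Pinv
      intro s
      simp only [pvAset_read, pvTriple_eq]
      split_ifs with hs
      · subst hs; exact ⟨by omega, by omega, Or.inr hderiv2⟩
      · exact hP s
    · -- Nodup
      exact List.nodup_cons.mpr ⟨hfresh, hND⟩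
    · -- done costs unchanged
      intro q hq
      have hne : q ≠ (r + dr, c + dc, nd) := fun h => ht0 (h ▸ hq)
      simp only [pvAset_read, pvTriple_eq]
      rw [if_neg hne]
      exact hB q hq
    · -- relaxedness of old done states
      intro q hq hqs t w' he
      have hneq : q ≠ (r + dr, c + dc, nd) := fun h => ht0 (h ▸ hq)
      have h1 := hC q hq hqs t w' he
      simp only [pvAset_read, pvTriple_eq]
      rw [if_neg hneq]
      split_ifs with hs
      · subst hs
        omega
      · exact h1
    · -- queue completeness
      intro t hts htD hlt
      simp only [pvAset_read, pvTriple_eq] at hlt ⊢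
      split_ifs at hlt ⊢ with hs
      · subst hs
        simp
      · exact List.mem_cons_of_mem _ (hQ t hts htD (by exact hlt))
    · -- entry invariant
      intro e he
      rcases List.mem_cons.mp he with rfl | he'
      · refine ⟨hderiv2, ?_, by omega, ?_, ?_, ?_⟩
        · simp [pvEState, pvAset_read]
        · exact ⟨hbnd.1, hbnd.2.1, hbnd.2.2.1, hbnd.2.2.2, hnd0, hnd4⟩
        · intro hmem; exact absurd hmem ht0
        · intro q hq
          have h6 := hDv q hq
          show pvDel board q ≤ v + w
          linarith
      · obtain ⟨e1, e2, e3, e4, e5, e6⟩ := hE e he'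
        refine ⟨e1, ?_, e3, e4, ?_, e6⟩
        · simp only [pvAset_read, pvTriple_eq]
          split_ifs with hs
          · rw [← hs] at himp
            linarith
          · exact e2
        · intro hmem
          have h5 := e5 hmem
          simp only [pvAset_read, pvTriple_eq]
          split_ifs with hs
          · exact absurd (hs ▸ hmem) ht0
          · exact h5
    · -- pointwise decrease
      intro t
      simp only [pvAset_read, pvTriple_eq]
      split_ifs with hs
      · rw [hs]
        omega
      · exact le_refl _
    · -- the processed direction is now relaxed
      intro t w' he hnd'
      obtain ⟨hteq, hweq, -⟩ := htgt t w' he hnd'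
      subst hteq
      rw [hweq]
      simp [pvAset_read]
  · -- no improvement: already relaxed
    apply hsame
    intro t w' he hnd'
    obtain ⟨hteq, hweq, -⟩ := htgt t w' he hnd'
    subst hteq
    have hread : st.2 (r + dr) (c + dc) nd = pvRead st.2 (r + dr, c + dc, nd) := rfl
    rw [hread] at himp
    rw [hweq]
    omega
  · -- out of bounds: no relevant edge exists
    apply hsame
    intro t w' he hnd'
    obtain ⟨-, -, b1, b2, b3, b4, -⟩ := htgt t w' he hnd'
    exact absurd ⟨b1, b2, b3, b4⟩ hbnd

lemma pvAprocess (board : List (List Int)) (D' : Finset (Int × Int × Int))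
    (v r c d : Int)
    (hder : pvDeriv board (r, c, d) v) (hv0 : 0 ≤ v)
    (hDv : ∀ q ∈ D', pvDel board q ≤ v)
    (st0 : List (Int × Int × Int × Int) × (Int → Int → Int → Int))
    (hmid : pvMid board D' (r, c, d) st0) :
    pvMid board D' (r, c, d)
        ((PySem.List.enumerate pvAdelta).foldl (pvAstep board (board.length : Int) v r c d) st0) ∧
    ((PySem.List.enumerate pvAdelta).foldl (pvAstep board (board.length : Int) v r c d) st0).1.length
      ≤ st0.1.length + 4 ∧
    (∀ t w, pvEdge board (r, c, d) t w →
      pvRead ((PySem.List.enumerate pvAdelta).foldl (pvAstep board (board.length : Int) v r c d) st0).2 t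
        ≤ v + w) := by
  have hfold : (PySem.List.enumerate pvAdelta).foldl (pvAstep board (board.length : Int) v r c d) st0
      = pvAstep board (board.length : Int) v r c d
          (pvAstep board (board.length : Int) v r c d
            (pvAstep board (board.length : Int) v r c d
              (pvAstep board (board.length : Int) v r c d st0 (0, -1, 0)) (1, 1, 0)) (2, 0, -1))
          (3, 0, 1) := rfl
  rw [hfold]
  obtain ⟨m1, l1, n1, b1⟩ := pvAstep_mid board D' v r c d 0 (-1) 0 hder hv0 hDv
    ⟨by norm_num, by norm_num, by decide⟩ st0 hmid
  obtain ⟨m2, l2, n2, b2⟩ := pvAstep_mid board D' v r c d 1 1 0 hder hv0 hDv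
    ⟨by norm_num, by norm_num, by decide⟩ _ m1
  obtain ⟨m3, l3, n3, b3⟩ := pvAstep_mid board D' v r c d 2 0 (-1) hder hv0 hDv
    ⟨by norm_num, by norm_num, by decide⟩ _ m2
  obtain ⟨m4, l4, n4, b4⟩ := pvAstep_mid board D' v r c d 3 0 1 hder hv0 hDv
    ⟨by norm_num, by norm_num, by decide⟩ _ m3
  refine ⟨m4, by omega, ?_⟩
  intro t w he
  have hd3 : 0 ≤ t.2.2 ∧ t.2.2 < 4 := ⟨he.1, he.2.1⟩
  obtain ⟨t1, t2, t3⟩ := t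
  simp only at hd3
  have h0 : (0:Int) ≤ t3 := hd3.1
  have h4 : t3 < 4 := hd3.2
  interval_cases t3
  · exact le_trans (l4 _) (le_trans (l3 _) (le_trans (l2 _) (b1 _ w he rfl)))
  · exact le_trans (l4 _) (le_trans (l3 _) (b2 _ w he rfl))
  · exact le_trans (l4 _) (b3 _ w he rfl)
  · exact b4 _ w he rfl

lemma pvDel_def (board : List (List Int)) (t : Int × Int × Int) :
    pvDel board t = pvRead (pvBfinal board) t := rfl

lemma pvAgoalMin_read (g : Int → Int → Int → Int) (n : Int) :
    pvAgoalMin g n = min (min (min (pvRead g (n-1, n-1, 0)) (pvRead g (n-1, n-1, 1)))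
      (pvRead g (n-1, n-1, 2))) (pvRead g (n-1, n-1, 3)) := rfl

-- main A lemma
lemma pvAmain (board : List (List Int)) (hn : 1 ≤ board.length) :
    ∀ fuel pq cost D, pvInv board pq cost D →
      pq.length + 5 * ((pvS (board.length : Int) \ D).card) < fuel →
      pvAloop board (board.length : Int) fuel pq cost =
        pvAgoalMin (pvBfinal board) (board.length : Int) := by
  have hn' : (1:Int) ≤ (board.length : Int) := by exact_mod_cast hn
  have hINFpos : (0:Int) < pvINF := by norm_num [pvINF]
  intro fuel
  induction fuel with
  | zero => intro pq cost D _ hm; omega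
  | succ f ih =>
    intro pq cost D hInv hm
    cases pq with
    | nil =>
      have hEq := pvEmptyEq board hn cost D hInv
      show pvAgoalMin cost _ = _
      rw [pvAgoalMin_read cost, pvAgoalMin_read (pvBfinal board)]
      simp only [← pvDel_def]
      rw [hEq _, hEq _, hEq _, hEq _]
    | cons e rest =>
      have hInv' := hInv
      obtain ⟨hP, hND, hD, hC, hQ, hE, hG⟩ := hInv'
      set m := rest.foldl pvAminE e with hmdef
      have hmem : m ∈ e :: rest := pvAmin_mem e rest
      have hminf : ∀ x ∈ e :: rest, m.1 ≤ x.1 := pvAmin_fst_le e rest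
      have hEm := hE m hmem
      dsimp only at hEm
      obtain ⟨hder, hcle, hinf, hsp, hstrict, hdelv⟩ := hEm
      have hccc : cost m.2.1 m.2.2.1 m.2.2.2 = pvRead cost (m.2.1, m.2.2.1, m.2.2.2) := rfl
      have hloop : pvAloop board (board.length:Int) (f+1) (e::rest) cost =
          (if m.1 > cost m.2.1 m.2.2.1 m.2.2.2
           then pvAloop board (board.length:Int) f ((e::rest).erase m) cost
           else if m.2.1 = (board.length:Int) - 1 ∧ m.2.2.1 = (board.length:Int) - 1
           then m.1
           else pvAloop board (board.length:Int) f
             ((PySem.List.enumerate pvAdelta).foldl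
               (pvAstep board (board.length:Int) m.1 m.2.1 m.2.2.1 m.2.2.2)
               ((e::rest).erase m, cost)).1
             ((PySem.List.enumerate pvAdelta).foldl
               (pvAstep board (board.length:Int) m.1 m.2.1 m.2.2.1 m.2.2.2)
               ((e::rest).erase m, cost)).2) := rfl
      rw [hloop]
      by_cases hstale : m.1 > cost m.2.1 m.2.2.1 m.2.2.2
      · rw [if_pos hstale]
        rw [hccc] at hstale
        have hlen := List.length_erase_of_mem hmem
        apply ih _ _ D ?_ (by rw [hlen]; simp only [List.length_cons] at hm ⊢; omega)
        refine ⟨hP, hND.erase _, hD, hC, ?_, ?_, hG⟩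
        · intro t hts htD hlt
          obtain ⟨t1, t2, t3⟩ := t
          have h1 := hQ (t1, t2, t3) hts htD hlt
          have hne : ((pvRead cost (t1, t2, t3), t1, t2, t3) : Int × Int × Int × Int) ≠ m := by
            intro hh
            rw [← hh] at hstale
            simp only at hstale
            omega
          exact (List.mem_erase_of_ne hne).mpr h1
        · intro e' he'
          exact hE e' (List.mem_of_mem_erase he')
      · rw [if_neg hstale]
        rw [hccc] at hstale
        have hveq : pvRead cost (m.2.1, m.2.2.1, m.2.2.2) = m.1 := by omega
        have hs0D : (m.2.1, m.2.2.1, m.2.2.2) ∉ D := by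
          intro h
          have := hstrict h
          omega
        have hδle : pvDel board (m.2.1, m.2.2.1, m.2.2.2) ≤ m.1 := by
          rcases (hP (m.2.1, m.2.2.1, m.2.2.2)).2.2 with hcs | hcs
          · have h1 := pvDel_le_init board (m.2.1, m.2.2.1, m.2.2.2)
            linarith [hveq, hcs.symm.le, hcs.le, h1]
          · have h5 := pvDel_le hn _ _ hcs
            linarith [hveq]
        have hm1δ : m.1 ≤ pvDel board (m.2.1, m.2.2.1, m.2.2.2) := by
          by_cases hδ : pvDel board (m.2.1, m.2.2.1, m.2.2.2) < pvINF
          · rcases pvDel_sound board (m.2.1, m.2.2.1, m.2.2.2) with hcs | hcs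
            · have h1 := (hP (m.2.1, m.2.2.1, m.2.2.2)).1
              unfold pvInit at hcs h1
              split_ifs at hcs h1 with hc0
              · linarith [hveq]
              · linarith
            · exact pvKey board hn _ cost D hInv m.1 hminf _ _ hcs hδ hs0D
          · have h2 := pvDel_le_init board (m.2.1, m.2.2.1, m.2.2.2)
            have h3 := pvInit_le_INF (m.2.1, m.2.2.1, m.2.2.2)
            have h4 := not_lt.mp hδ
            linarith
        have hvδ : pvDel board (m.2.1, m.2.2.1, m.2.2.2) = m.1 := le_antisymm hδle hm1δ
        by_cases hgoal : m.2.1 = (board.length:Int) - 1 ∧ m.2.2.1 = (board.length:Int) - 1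
        · rw [if_pos hgoal]
          -- the popped goal state carries the minimal goal distance
          have hgb : ∀ d' : Int, 0 ≤ d' → d' < 4 →
              m.1 ≤ pvDel board ((board.length:Int)-1, (board.length:Int)-1, d') := by
            intro d' hd1 hd2
            have htD := hG d'
            by_cases hδ : pvDel board ((board.length:Int)-1, (board.length:Int)-1, d') < pvINF
            · rcases pvDel_sound board ((board.length:Int)-1, (board.length:Int)-1, d') with hcs | hcs
              · have h1 := (hP ((board.length:Int)-1, (board.length:Int)-1, d')).1
                unfold pvInit at hcs h1
                split_ifs at hcs h1 with hc0
                · have hsp' : pvInSp (board.length:Int) ((board.length:Int)-1, (board.length:Int)-1, d') :=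
                    ⟨by omega, by omega, by omega, by omega, hd1, hd2⟩
                  have hlt : pvRead cost ((board.length:Int)-1, (board.length:Int)-1, d') < pvINF := by
                    linarith
                  have h4 := hminf _ (hQ _ hsp' htD hlt)
                  simp only at h4
                  linarith
                · linarith
              · exact pvKey board hn _ cost D hInv m.1 hminf _ _ hcs hδ htD
            · have h4 := not_lt.mp hδ
              linarith [hinf]
          have hd3 : 0 ≤ m.2.2.2 ∧ m.2.2.2 < 4 := ⟨hsp.2.2.2.2.1, hsp.2.2.2.2.2⟩
          have hδs : pvDel board ((board.length:Int)-1, (board.length:Int)-1, m.2.2.2) ≤ m.1 := by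
            have heqt : (((board.length:Int)-1, (board.length:Int)-1, m.2.2.2) : Int × Int × Int)
                = (m.2.1, m.2.2.1, m.2.2.2) := by rw [hgoal.1, hgoal.2]
            rw [heqt]
            exact hδle
          have g0 := hgb 0 (by norm_num) (by norm_num)
          have g1 := hgb 1 (by norm_num) (by norm_num)
          have g2 := hgb 2 (by norm_num) (by norm_num)
          have g3 := hgb 3 (by norm_num) (by norm_num)
          rw [pvAgoalMin_read (pvBfinal board)]
          simp only [← pvDel_def]
          obtain ⟨hdd1, hdd2⟩ := hd3
          set dd := m.2.2.2 with hdd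
          interval_cases dd <;> · simp only [min_def]; split_ifs <;> linarith
        · rw [if_neg hgoal]
          -- process the popped state
          set D' : Finset (Int × Int × Int) := insert (m.2.1, m.2.2.1, m.2.2.2) D with hD'def
          have hsD' : ((m.2.1, m.2.2.1, m.2.2.2) : Int × Int × Int) ∈ D' := Finset.mem_insert_self _ _
          have hDv : ∀ q ∈ D', pvDel board q ≤ m.1 := by
            intro q hq
            rcases Finset.mem_insert.mp hq with rfl | hq'
            · exact hvδ.le
            · exact hdelv q hq'
          have hmid0 : pvMid board D' (m.2.1, m.2.2.1, m.2.2.2) ((e::rest).erase m, cost) := by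
            unfold pvMid
            dsimp only
            refine ⟨hP, hND.erase _, ?_, ?_, ?_, ?_⟩
            · intro q hq
              rcases Finset.mem_insert.mp hq with rfl | hq'
              · exact ⟨hsp, by rw [hveq, hvδ]⟩
              · exact hD q hq'
            · intro q hq hqs t w he'
              rcases Finset.mem_insert.mp hq with rfl | hq'
              · exact absurd rfl hqs
              · exact hC q hq' t w he'
            · intro t hts htD' hlt
              have htne : t ≠ (m.2.1, m.2.2.1, m.2.2.2) := by
                intro hh
                exact htD' (hh ▸ hsD')
              have htD : t ∉ D := fun h => htD' (Finset.mem_insert_of_mem h)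
              obtain ⟨t1, t2, t3⟩ := t
              have h1 := hQ (t1, t2, t3) hts htD hlt
              have hne : ((pvRead cost (t1, t2, t3), t1, t2, t3) : Int × Int × Int × Int) ≠ m := by
                intro hh
                apply htne
                rw [← hh]
              exact (List.mem_erase_of_ne hne).mpr h1
            · intro e' he'
              have hmm := List.mem_of_mem_erase he'
              have hEe := hE e' hmm
              dsimp only at hEe
              obtain ⟨f1, f2, f3, f4, f5, f6⟩ := hEe
              have hminf' := hminf e' hmm
              refine ⟨f1, f2, f3, f4, ?_, ?_⟩
              · intro hq
                rcases Finset.mem_insert.mp hq with hq' | hq'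
                · -- an un-popped entry of the popped state must be strictly worse
                  have hne : e' ≠ m := by
                    intro hh
                    rw [hh] at he'
                    exact (List.Nodup.not_mem_erase hND) he'
                  have hfne : e'.1 ≠ m.1 := by
                    intro hh
                    apply hne
                    have h9 : pvEState e' = (m.2.1, m.2.2.1, m.2.2.2) := hq'
                    simp only [pvEState, Prod.ext_iff] at h9 ⊢
                    exact ⟨hh, h9⟩
                  rw [hq', hveq]
                  exact lt_of_le_of_ne hminf' (fun hh => hfne hh.symm)
                · exact f5 hq'
              · intro q hq
                rcases Finset.mem_insert.mp hq with rfl | hq'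
                · linarith [hminf']
                · exact f6 q hq'
          obtain ⟨hmidf, hlenf, hrelf⟩ := pvAprocess board D' m.1 m.2.1 m.2.2.1 m.2.2.2
            hder (pvDeriv_nonneg hder) hDv _ hmid0
          obtain ⟨g1, g2, g3, g4, g5, g6⟩ := hmidf
          have hInv2 : pvInv board
              ((PySem.List.enumerate pvAdelta).foldl
                (pvAstep board (board.length:Int) m.1 m.2.1 m.2.2.1 m.2.2.2)
                ((e::rest).erase m, cost)).1
              ((PySem.List.enumerate pvAdelta).foldl
                (pvAstep board (board.length:Int) m.1 m.2.1 m.2.2.1 m.2.2.2)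
                ((e::rest).erase m, cost)).2 D' := by
            refine ⟨g1, g2, g3, ?_, g5, g6, ?_⟩
            · intro q hq t w he'
              by_cases hqs : q = (m.2.1, m.2.2.1, m.2.2.2)
              · subst hqs
                have h1 := hrelf t w he'
                have h2 := (g3 _ hq).2
                rw [h2, hvδ]
                exact h1
              · exact g4 q hq hqs t w he'
            · intro d' hmemg
              rcases Finset.mem_insert.mp hmemg with h' | h'
              · apply hgoal
                simp only [Prod.mk.injEq] at h'
                exact ⟨h'.1.symm, h'.2.1.symm⟩
              · exact hG d' h'
          apply ih _ _ D' hInv2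
          have hlen : ((e :: rest).erase m).length = (e :: rest).length - 1 :=
            List.length_erase_of_mem hmem
          have hcard : ((pvS (board.length:Int) \ D').card) < ((pvS (board.length:Int) \ D).card) := by
            apply Finset.card_lt_card
            rw [Finset.ssubset_def]
            constructor
            · exact Finset.sdiff_subset_sdiff (Finset.Subset.refl _) (Finset.subset_insert _ _)
            · intro hsup
              have hsmem : (m.2.1, m.2.2.1, m.2.2.2) ∈ pvS (board.length:Int) \ D :=
                Finset.mem_sdiff.mpr ⟨pvMemS.mpr hsp, hs0D⟩
              have := hsup hsmem
              rw [Finset.mem_sdiff] at this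
              exact this.2 hsD'
          have hb2 : (((e::rest).erase m, cost)).1.length = ((e::rest).erase m).length := rfl
          simp only [List.length_cons] at hm hlen
          omega

lemma pvInv_init (board : List (List Int)) (hn : 1 ≤ board.length) :
    pvInv board [(0, 0, 0, 0), (0, 0, 0, 1), (0, 0, 0, 2), (0, 0, 0, 3)] pvCost0 ∅ := by
  have hn' : (1:Int) ≤ (board.length : Int) := by exact_mod_cast hn
  have hINFpos : (0:Int) < pvINF := by norm_num [pvINF]
  refine ⟨pvPinv_cost0 board, by decide, ?_, ?_, ?_, ?_, ?_⟩
  · intro q hq; exact absurd hq (Finset.notMem_empty _)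
  · intro q hq; exact absurd hq (Finset.notMem_empty _)
  · intro t hts _ hlt
    obtain ⟨t1, t2, t3⟩ := t
    have hr : pvRead pvCost0 (t1, t2, t3) = if t1 = 0 ∧ t2 = 0 then 0 else 1000000000 := rfl
    rw [hr] at hlt ⊢
    split_ifs at hlt ⊢ with hc
    · obtain ⟨rfl, rfl⟩ := hc
      obtain ⟨-, -, -, -, h5, h6⟩ := hts
      simp only at h5 h6
      interval_cases t3 <;> simp
    · exfalso; unfold pvINF at hlt; omega
  · intro e he
    have hle : pvRead pvCost0 (0, 0, (0:Int)) ≤ 0 := le_refl _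
    fin_cases he <;>
      exact ⟨pvDeriv.start _ (by norm_num) (by norm_num), le_refl _, by norm_num [pvINF],
        ⟨le_refl _, hn', le_refl _, hn', by norm_num, by norm_num⟩,
        fun h => absurd h (Finset.notMem_empty _),
        fun q hq => absurd hq (Finset.notMem_empty _)⟩
  · intro d'; exact Finset.notMem_empty _

-- ===== VERDICT (by name: the statement is the Claim_ definition above) =====
theorem solution_spec : Claim_equal_solution := by
  intro board _ hpre
  unfold Spec_solution
  obtain ⟨hn, -⟩ := hpre
  have hA : solution board = pvAloop board (board.length:Int)
      (5 + 20 * board.length * board.length)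
      [(0, 0, 0, 0), (0, 0, 0, 1), (0, 0, 0, 2), (0, 0, 0, 3)] pvCost0 := rfl
  have hB : solution_alt board = pvAgoalMin (pvBfinal board) (board.length:Int) := rfl
  rw [hA, hB]
  apply pvAmain board hn _ _ _ ∅ (pvInv_init board hn)
  rw [Finset.sdiff_empty, pvS_card board]
  have h1 : 5 * (board.length * (board.length * 4)) = 20 * board.length * board.length := by ring
  simp only [List.length_cons, List.length_nil]
  omega
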